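-- pv_equiv track=rewrite | github.com/Nyannn915/project1 | task2.py | words_on_board
-- ===== SOURCE A (Python) =====
-- def words_on_board(words, board):
--     tiles_list = []
--
--     for row_number in range(len(board)):
--         current_row = board[row_number]
--
--
--         for tile_number in range(len(current_row)):
--
--             tiles_list.append(current_row[tile_number])
--
--     valid_words = []
--
--     for word_index in range(len(words)):
--
--         current_word = words[word_index]
--
--         hand_copy = []
--         for i in range(len(tiles_list)):
--             hand_copy.append(tiles_list[i])
--
--         is_valid = True
--
--         for letter_position in range(len(current_word)):
--
--             current_letter = current_word[letter_position]
--
--             found_in_hand = False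
--             for j in range(len(hand_copy)):
--                 if hand_copy[j] == current_letter:
--
--                     hand_copy.pop(j)
--                     found_in_hand = True
--                     break
--
--
--             if not found_in_hand:
--                 is_valid = False
--                 break
--
--
--         if is_valid:
--             valid_words.append(current_word)
--
--     return valid_words
-- ===== SOURCE B (Python) =====
-- def words_on_board(words, board):
--     tiles = {}
--     for row in board:
--         for t in row:
--             tiles[t] = tiles.get(t, 0) + 1
--     result = []
--     for w in words:
--         need = {}
--         for ch in w:
--             need[ch] = need.get(ch, 0) + 1
--         if all(tiles.get(ch, 0) >= n for ch, n in need.items()):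
--             result.append(w)
--     return result
-- ===== Notes on version B (the rewrite author's own statement) =====
-- stated objective: faster
-- what changed: Replaced the per-word copy of the tile list with repeated linear scan-and-pop per letter by a tile frequency dictionary built once, with each word checked by comparing its own letter counts against it.
import Mathlib
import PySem

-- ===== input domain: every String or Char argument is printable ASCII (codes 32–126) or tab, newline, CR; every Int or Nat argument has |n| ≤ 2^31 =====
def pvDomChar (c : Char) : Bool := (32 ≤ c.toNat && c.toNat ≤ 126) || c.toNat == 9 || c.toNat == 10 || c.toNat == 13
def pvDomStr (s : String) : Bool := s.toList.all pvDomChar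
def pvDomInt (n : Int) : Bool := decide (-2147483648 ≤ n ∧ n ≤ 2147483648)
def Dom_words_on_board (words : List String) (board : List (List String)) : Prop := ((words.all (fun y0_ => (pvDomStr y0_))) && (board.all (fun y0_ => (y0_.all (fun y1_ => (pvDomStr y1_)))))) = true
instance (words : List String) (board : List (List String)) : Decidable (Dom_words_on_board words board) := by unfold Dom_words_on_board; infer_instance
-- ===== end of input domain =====

-- B replaces A's per-word tile-list copy with scan-and-pop per letter by a tile
-- frequency dictionary built once and a per-word letter-count comparison (faster).

-- ===== PORT A =====
-- the inner j-loop of A: scan hand_copy for the first tile equal to letter, pop it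
def pvRemoveA (hand : List String) (letter : String) : Option (List String) :=
  match hand with
  | [] => none
  | t :: rest => if t == letter then some rest else (pvRemoveA rest letter).map (t :: ·)

-- the letter_position loop of A over one word (break on a letter not found in hand)
def pvCheckA (letters : List Char) (hand : List String) : Bool :=
  match letters with
  | [] => true
  | c :: cs =>
    match pvRemoveA hand (String.mk [c]) with
    | none => false
    | some h => pvCheckA cs h

def words_on_board (words : List String) (board : List (List String)) : List String :=
  let tiles_list := board.foldl (fun acc row => row.foldl (fun a t => a ++ [t]) acc) []
  words.foldl (fun acc w =>
    let hand_copy := tiles_list.foldl (fun a t => a ++ [t]) []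
    if pvCheckA w.toList hand_copy then acc ++ [w] else acc) []

-- ===== PORT B =====
def words_on_board_alt (words : List String) (board : List (List String)) : List String :=
  let tiles : PySem.Dict String Int :=
    board.foldl (fun d row => row.foldl (fun d t => d.insert t (d.getD t 0 + 1)) d) PySem.Dict.empty
  words.foldl (fun acc w =>
    let need : PySem.Dict String Int :=
      w.toList.foldl (fun d c => d.insert (String.mk [c]) (d.getD (String.mk [c]) 0 + 1)) PySem.Dict.empty
    if need.items.all (fun p => decide (p.2 ≤ tiles.getD p.1 0)) then acc ++ [w] else acc) []

-- ===== PRECONDITION & SPEC =====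
def Spec_words_on_board (words : List String) (board : List (List String)) (out : List String) : Prop := out = words_on_board_alt words board
instance (words : List String) (board : List (List String)) (out : List String) : Decidable (Spec_words_on_board words board out) := by unfold Spec_words_on_board; infer_instance

-- ===== CLAIM (what is proved, stated in full; the proofs are below) =====
def Claim_equal_words_on_board : Prop := ∀ (words : List String) (board : List (List String)), Dom_words_on_board words board → Spec_words_on_board words board (words_on_board words board)

-- ===== LEMMAS AND PROOFS =====

theorem foldl_append_id (l : List String) (init : List String) :
    l.foldl (fun a t => a ++ [t]) init = init ++ l := by
  induction l generalizing init with
  | nil => simp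
  | cons x xs ih => rw [List.foldl_cons, ih]; simp

theorem tilesA_eq_flatten (board : List (List String)) :
    board.foldl (fun acc row => row.foldl (fun a t => a ++ [t]) acc) [] = board.flatten := by
  have h : ∀ (b : List (List String)) (init : List String),
      b.foldl (fun acc row => row.foldl (fun a t => a ++ [t]) acc) init = init ++ b.flatten := by
    intro b
    induction b with
    | nil => simp
    | cons r rs ih =>
      intro init
      rw [List.foldl_cons, foldl_append_id, ih]
      simp
  simpa using h board []

theorem pvRemoveA_eq_remove? (hand : List String) (s : String) :
    pvRemoveA hand s = PySem.List.remove? hand s := by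
  induction hand with
  | nil => rfl
  | cons t rest ih =>
    by_cases h : t = s
    · subst h; simp [pvRemoveA]
    · rw [PySem.List.remove?_cons_of_ne rest h]
      simp [pvRemoveA, h, ih]

theorem pvCheckA_iff (letters : List Char) (hand : List String) :
    pvCheckA letters hand = true ↔
      ∀ s, (letters.map (fun c => String.mk [c])).count s ≤ hand.count s := by
  induction letters generalizing hand with
  | nil => simp [pvCheckA]
  | cons c cs ih =>
    by_cases hmem : String.mk [c] ∈ hand
    · have hrem : pvRemoveA hand (String.mk [c]) = some (hand.erase (String.mk [c])) := by
        rw [pvRemoveA_eq_remove?]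
        exact PySem.List.remove?_eq_some_erase hand _ hmem
      have h1 : 1 ≤ hand.count (String.mk [c]) := List.one_le_count_iff.mpr hmem
      simp only [pvCheckA, hrem, ih, List.map_cons]
      constructor
      · intro h s
        have h2 := h s
        rw [List.count_erase] at h2
        rw [List.count_cons]
        by_cases hss : String.mk [c] = s
        · subst hss
          simp only [beq_self_eq_true, if_true] at h2 ⊢
          omega
        · simp only [beq_iff_eq] at h2 ⊢
          rw [if_neg hss] at h2 ⊢
          omega
      · intro h s
        have h2 := h s
        rw [List.count_cons] at h2
        rw [List.count_erase]
        by_cases hss : String.mk [c] = s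
        · subst hss
          simp only [beq_self_eq_true, if_true] at h2 ⊢
          omega
        · simp only [beq_iff_eq] at h2 ⊢
          rw [if_neg hss] at h2 ⊢
          omega
    · have hnone : pvRemoveA hand (String.mk [c]) = none := by
        rw [pvRemoveA_eq_remove?, PySem.List.remove?_eq_none_iff]
        exact hmem
      simp only [pvCheckA, hnone]
      constructor
      · intro h; exact absurd h (by simp)
      · intro h
        exfalso
        have h2 := h (String.mk [c])
        have h0 : hand.count (String.mk [c]) = 0 := List.count_eq_zero.mpr hmem
        simp [h0] at h2

theorem checkB_iff (w : String) (flat : List String) :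
    ((w.toList.foldl (fun d c => d.insert (String.mk [c]) (d.getD (String.mk [c]) 0 + 1)) PySem.Dict.empty).items.all
        (fun p => decide (p.2 ≤ (PySem.Dict.counter flat).getD p.1 0)) = true) ↔
      ∀ s, (w.toList.map (fun c => String.mk [c])).count s ≤ flat.count s := by
  have hfold : w.toList.foldl (fun d c => d.insert (String.mk [c]) (d.getD (String.mk [c]) 0 + 1)) PySem.Dict.empty
      = PySem.Dict.counter (w.toList.map (fun c => String.mk [c])) := by
    rw [← PySem.Dict.foldl_insert_getD_add_one_eq_counter, List.foldl_map]
  rw [hfold, PySem.Dict.items_counter, List.all_map, List.all_eq_true]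
  constructor
  · intro h s
    by_cases hs : s ∈ w.toList.map (fun c => String.mk [c])
    · have h2 := h s ((PySem.Set.mem_ofList _ s).mpr hs)
      simp only [Function.comp, PySem.Dict.getD_counter, decide_eq_true_eq] at h2
      exact_mod_cast h2
    · simp [List.count_eq_zero.mpr hs]
  · intro h s _
    simp only [Function.comp, PySem.Dict.getD_counter, decide_eq_true_eq]
    exact_mod_cast h s

-- ===== VERDICT (by name: the statement is the Claim_ definition above) =====
theorem words_on_board_spec : Claim_equal_words_on_board := by
  intro words board _
  unfold Spec_words_on_board words_on_board words_on_board_alt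
  have htiles : board.foldl (fun d row => row.foldl (fun d t => d.insert t (d.getD t 0 + 1)) d)
      (PySem.Dict.empty : PySem.Dict String Int) = PySem.Dict.counter board.flatten := by
    rw [← PySem.Dict.foldl_insert_getD_add_one_eq_counter, ← List.foldl_flatten]
  simp only [tilesA_eq_flatten]
  simp only [foldl_append_id, List.nil_append]
  simp only [htiles]
  congr 1
  funext acc w
  congr 1
  exact propext ((pvCheckA_iff w.toList board.flatten).trans (checkB_iff w board.flatten).symm)
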